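-- pv_equiv track=rewrite | github.com/Nomoos/StoryGenerator | scripts/process_trends.py | suggest_audiences
-- ===== SOURCE A (Python) =====
-- def suggest_audiences(topic):
--     """Suggest target audiences based on topic."""
--     topic_lower = topic.lower()
--
--     # Default audiences
--     audiences = []
--
--     # Technology topics
--     if any(word in topic_lower for word in ["ai", "tech", "software", "coding", "app"]):
--         audiences = ["men/20-24", "men/25-29", "women/20-24"]
--
--     # Entertainment topics
--     elif any(word in topic_lower for word in ["music", "movie", "game", "celebrity"]):
--         audiences = ["women/15-19", "men/15-19", "women/20-24", "men/20-24"]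
--
--     # Education topics
--     elif any(word in topic_lower for word in ["learning", "education", "how", "what"]):
--         audiences = ["men/20-24", "women/20-24", "men/25-29", "women/25-29"]
--
--     # Science topics
--     elif any(word in topic_lower for word in ["space", "science", "climate", "research"]):
--         audiences = ["men/20-24", "men/25-29", "women/20-24"]
--
--     # Default
--     else:
--         audiences = ["men/20-24", "women/20-24", "men/25-29"]
--
--     return audiences[:3]  # Top 3 audiences
-- ===== SOURCE B (Python) =====
-- # Naive multi-pattern scan: walk the lowered topic once by position, collect the
-- # minimum category tag of any keyword starting there, then index the audience table.
-- _KEYWORDS = [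
--     ("ai", 0), ("tech", 0), ("software", 0), ("coding", 0), ("app", 0),
--     ("music", 1), ("movie", 1), ("game", 1), ("celebrity", 1),
--     ("learning", 2), ("education", 2), ("how", 2), ("what", 2),
--     ("space", 3), ("science", 3), ("climate", 3), ("research", 3),
-- ]
-- _CATEGORY_AUDIENCES = [
--     ["men/20-24", "men/25-29", "women/20-24"],
--     ["women/15-19", "men/15-19", "women/20-24", "men/20-24"],
--     ["men/20-24", "women/20-24", "men/25-29", "women/25-29"],
--     ["men/20-24", "men/25-29", "women/20-24"],
--     ["men/20-24", "women/20-24", "men/25-29"],  # default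
-- ]
--
-- def suggest_audiences(topic):
--     """Suggest target audiences based on topic."""
--     tl = topic.lower()
--     best = min((cat for i in range(len(tl) + 1)
--                     for kw, cat in _KEYWORDS
--                     if tl.startswith(kw, i)),
--                default=len(_CATEGORY_AUDIENCES) - 1)
--     return _CATEGORY_AUDIENCES[best][:3]
-- ===== Notes on version B (the rewrite author's own statement) =====
-- stated objective: alternative
-- what changed: Replaces the if/elif chain of per-category substring tests with a naive multi-pattern scan: one pass over the string positions collecting the minimum category tag of any keyword starting there, then a single indexed lookup into an audience table.
import Mathlib
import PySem

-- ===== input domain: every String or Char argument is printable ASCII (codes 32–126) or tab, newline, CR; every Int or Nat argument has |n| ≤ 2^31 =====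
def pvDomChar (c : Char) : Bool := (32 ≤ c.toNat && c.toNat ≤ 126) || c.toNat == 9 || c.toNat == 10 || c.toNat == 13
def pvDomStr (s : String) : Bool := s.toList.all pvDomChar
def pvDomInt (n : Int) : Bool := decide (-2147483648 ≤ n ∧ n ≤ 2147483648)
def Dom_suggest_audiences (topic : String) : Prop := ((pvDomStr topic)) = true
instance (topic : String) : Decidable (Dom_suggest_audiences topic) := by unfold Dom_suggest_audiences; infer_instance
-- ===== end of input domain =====

-- B replaces the if/elif chain of substring tests by a naive multi-pattern position scan
-- taking the minimum category tag, then one indexed table lookup (alternative decomposition; no speed claim).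

-- ===== PORT A =====
def suggest_audiences (topic : String) : List String :=
  let topic_lower := PySem.Str.lower topic
  let audiences :=
    if ["ai", "tech", "software", "coding", "app"].any (fun word => PySem.Str.isIn word topic_lower) then
      ["men/20-24", "men/25-29", "women/20-24"]
    else if ["music", "movie", "game", "celebrity"].any (fun word => PySem.Str.isIn word topic_lower) then
      ["women/15-19", "men/15-19", "women/20-24", "men/20-24"]
    else if ["learning", "education", "how", "what"].any (fun word => PySem.Str.isIn word topic_lower) then
      ["men/20-24", "women/20-24", "men/25-29", "women/25-29"]
    else if ["space", "science", "climate", "research"].any (fun word => PySem.Str.isIn word topic_lower) then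
      ["men/20-24", "men/25-29", "women/20-24"]
    else
      ["men/20-24", "women/20-24", "men/25-29"]
  PySem.List.slice audiences none (some 3)

-- ===== PORT B =====
def kwTags : List (List Char × Nat) :=
  [ ("ai".toList, 0), ("tech".toList, 0), ("software".toList, 0), ("coding".toList, 0), ("app".toList, 0),
    ("music".toList, 1), ("movie".toList, 1), ("game".toList, 1), ("celebrity".toList, 1),
    ("learning".toList, 2), ("education".toList, 2), ("how".toList, 2), ("what".toList, 2),
    ("space".toList, 3), ("science".toList, 3), ("climate".toList, 3), ("research".toList, 3) ]

def catAudiences : List (List String) :=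
  [ ["men/20-24", "men/25-29", "women/20-24"],
    ["women/15-19", "men/15-19", "women/20-24", "men/20-24"],
    ["men/20-24", "women/20-24", "men/25-29", "women/25-29"],
    ["men/20-24", "men/25-29", "women/20-24"],
    ["men/20-24", "women/20-24", "men/25-29"] ]

-- the generator expression: tags of keywords starting at some position i ∈ range(len(tl)+1)
-- (tl.startswith(kw, i) for 0 ≤ i ≤ len(tl) is exactly 'kw is a prefix of tl[i:]')
def scanTags (tl : List Char) : List Nat :=
  (List.range (tl.length + 1)).flatMap (fun i =>
    (kwTags.filter (fun p => PySem.Chars.startswith (tl.drop i) p.1)).map Prod.snd)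

def suggest_audiences_alt (topic : String) : List String :=
  let tl := (PySem.Str.lower topic).toList
  -- min(gen, default=…) = left fold of min over the generated tags starting from the default
  let best := (scanTags tl).foldl min (catAudiences.length - 1)
  -- best ≤ 4 < catAudiences.length always, so the index is in range; getD [] totalizes
  PySem.List.slice ((PySem.List.pyGet? catAudiences (best : Int)).getD []) none (some 3)

-- ===== PRECONDITION & SPEC =====
def Spec_suggest_audiences (topic : String) (out : List String) : Prop := out = suggest_audiences_alt topic
instance (topic : String) (out : List String) : Decidable (Spec_suggest_audiences topic out) := by unfold Spec_suggest_audiences; infer_instance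

-- ===== CLAIM =====
def Claim_equal_suggest_audiences : Prop := ∀ (topic : String), Dom_suggest_audiences topic → Spec_suggest_audiences topic (suggest_audiences topic)

-- ===== LEMMAS AND PROOFS =====

theorem foldl_min_le_init (l : List Nat) (b : Nat) : l.foldl min b ≤ b := by
  induction l generalizing b with
  | nil => simp
  | cons x xs ih => exact le_trans (ih (min b x)) (min_le_left _ _)

theorem foldl_min_le_mem (l : List Nat) : ∀ (b x : Nat), x ∈ l → l.foldl min b ≤ x := by
  induction l with
  | nil => intro _ _ h; cases h
  | cons y ys ih =>
    intro b x hx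
    rcases List.mem_cons.mp hx with h | h
    · subst h; exact le_trans (foldl_min_le_init ys (min b x)) (min_le_right _ _)
    · exact ih (min b y) x h

theorem foldl_min_mem (l : List Nat) : ∀ (b : Nat), l.foldl min b = b ∨ l.foldl min b ∈ l := by
  induction l with
  | nil => intro _; left; rfl
  | cons x xs ih =>
    intro b
    rcases ih (min b x) with h | h
    · rcases le_total b x with h' | h'
      · left; simp only [List.foldl]; rw [h, min_eq_left h']
      · right; simp only [List.foldl]; rw [h, min_eq_right h']; exact List.mem_cons_self
    · right; simp only [List.foldl]; exact List.mem_cons_of_mem _ h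

-- a keyword starts at some scanned position iff it is a substring
theorem exists_startswith_iff (tl sub : List Char) :
    (∃ i ∈ List.range (tl.length + 1), PySem.Chars.startswith (tl.drop i) sub = true)
      ↔ PySem.Chars.isIn sub tl = true := by
  rw [← PySem.Chars.exists_prefix_drop_iff_isIn]
  constructor
  · rintro ⟨i, _, h⟩
    exact ⟨i, (PySem.Chars.startswith_iff _ _).mp h⟩
  · rintro ⟨j, h⟩
    by_cases hj : j ≤ tl.length
    · exact ⟨j, List.mem_range.mpr (by omega), (PySem.Chars.startswith_iff _ _).mpr h⟩
    · refine ⟨tl.length, List.mem_range.mpr (by omega), (PySem.Chars.startswith_iff _ _).mpr ?_⟩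
      have hnil : tl.drop j = [] := List.drop_eq_nil_of_le (by omega)
      have hsub : sub = [] := List.prefix_nil.mp (hnil ▸ h)
      simp [hsub]

theorem mem_scanTags_iff (tl : List Char) (c : Nat) :
    c ∈ scanTags tl ↔ ∃ p ∈ kwTags, PySem.Chars.isIn p.1 tl = true ∧ p.2 = c := by
  unfold scanTags
  simp only [List.mem_flatMap, List.mem_map, List.mem_filter]
  constructor
  · rintro ⟨i, hi, p, ⟨hp, hs⟩, hc⟩
    exact ⟨p, hp, (exists_startswith_iff tl p.1).mp ⟨i, hi, hs⟩, hc⟩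
  · rintro ⟨p, hp, hin, hc⟩
    obtain ⟨i, hi, hs⟩ := (exists_startswith_iff tl p.1).mpr hin
    exact ⟨i, hi, p, ⟨hp, hs⟩, hc⟩

-- link a tag's membership to A's per-category boolean tests (on the lowered string)
theorem mem_scanTags_cat (t : String) (c : Nat) :
    c ∈ scanTags t.toList ↔
      (c = 0 ∧ (["ai", "tech", "software", "coding", "app"].any (fun w => PySem.Str.isIn w t)) = true) ∨
      (c = 1 ∧ (["music", "movie", "game", "celebrity"].any (fun w => PySem.Str.isIn w t)) = true) ∨
      (c = 2 ∧ (["learning", "education", "how", "what"].any (fun w => PySem.Str.isIn w t)) = true) ∨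
      (c = 3 ∧ (["space", "science", "climate", "research"].any (fun w => PySem.Str.isIn w t)) = true) := by
  rw [mem_scanTags_iff]
  constructor
  · rintro ⟨p, hp, hin, hc⟩
    fin_cases hp <;>
      first
      | exact Or.inl ⟨hc.symm, by simp only [PySem.Str.isIn_eq, List.any_cons, List.any_nil, Bool.or_eq_true]; tauto⟩
      | exact Or.inr (Or.inl ⟨hc.symm, by simp only [PySem.Str.isIn_eq, List.any_cons, List.any_nil, Bool.or_eq_true]; tauto⟩)
      | exact Or.inr (Or.inr (Or.inl ⟨hc.symm, by simp only [PySem.Str.isIn_eq, List.any_cons, List.any_nil, Bool.or_eq_true]; tauto⟩))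
      | exact Or.inr (Or.inr (Or.inr ⟨hc.symm, by simp only [PySem.Str.isIn_eq, List.any_cons, List.any_nil, Bool.or_eq_true]; tauto⟩))
  · intro h
    rcases h with ⟨hc, h⟩ | ⟨hc, h⟩ | ⟨hc, h⟩ | ⟨hc, h⟩ <;> subst hc <;>
      simp only [PySem.Str.isIn_eq, List.any_cons, List.any_nil, Bool.or_eq_true] at h
    · rcases h with h|h|h|h|h
      · exact ⟨("ai".toList, 0), by decide, by simpa using h, rfl⟩
      · exact ⟨("tech".toList, 0), by decide, by simpa using h, rfl⟩
      · exact ⟨("software".toList, 0), by decide, by simpa using h, rfl⟩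
      · exact ⟨("coding".toList, 0), by decide, by simpa using h, rfl⟩
      · exact ⟨("app".toList, 0), by decide, by simpa using h, rfl⟩
    · rcases h with h|h|h|h
      · exact ⟨("music".toList, 1), by decide, by simpa using h, rfl⟩
      · exact ⟨("movie".toList, 1), by decide, by simpa using h, rfl⟩
      · exact ⟨("game".toList, 1), by decide, by simpa using h, rfl⟩
      · exact ⟨("celebrity".toList, 1), by decide, by simpa using h, rfl⟩
    · rcases h with h|h|h|h
      · exact ⟨("learning".toList, 2), by decide, by simpa using h, rfl⟩
      · exact ⟨("education".toList, 2), by decide, by simpa using h, rfl⟩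
      · exact ⟨("how".toList, 2), by decide, by simpa using h, rfl⟩
      · exact ⟨("what".toList, 2), by decide, by simpa using h, rfl⟩
    · rcases h with h|h|h|h
      · exact ⟨("space".toList, 3), by decide, by simpa using h, rfl⟩
      · exact ⟨("science".toList, 3), by decide, by simpa using h, rfl⟩
      · exact ⟨("climate".toList, 3), by decide, by simpa using h, rfl⟩
      · exact ⟨("research".toList, 3), by decide, by simpa using h, rfl⟩

theorem best_eq (t : String) :
    (scanTags t.toList).foldl min 4 =
      (if (["ai", "tech", "software", "coding", "app"].any (fun w => PySem.Str.isIn w t)) = true then 0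
       else if (["music", "movie", "game", "celebrity"].any (fun w => PySem.Str.isIn w t)) = true then 1
       else if (["learning", "education", "how", "what"].any (fun w => PySem.Str.isIn w t)) = true then 2
       else if (["space", "science", "climate", "research"].any (fun w => PySem.Str.isIn w t)) = true then 3
       else 4) := by
  set L := scanTags t.toList with hL
  have hmem := fun c => mem_scanTags_cat t c
  have hcases := foldl_min_mem L 4
  split_ifs with h0 h1 h2 h3
  · have hle := foldl_min_le_mem L 4 0 ((hmem 0).mpr (Or.inl ⟨rfl, h0⟩))
    omega
  · have hle := foldl_min_le_mem L 4 1 ((hmem 1).mpr (Or.inr (Or.inl ⟨rfl, h1⟩)))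
    rcases hcases with h | h
    · omega
    · rcases (hmem _).mp h with ⟨hc, hb⟩ | ⟨hc, _⟩ | ⟨hc, _⟩ | ⟨hc, _⟩
      · exact absurd hb h0
      all_goals omega
  · have hle := foldl_min_le_mem L 4 2 ((hmem 2).mpr (Or.inr (Or.inr (Or.inl ⟨rfl, h2⟩))))
    rcases hcases with h | h
    · omega
    · rcases (hmem _).mp h with ⟨hc, hb⟩ | ⟨hc, hb⟩ | ⟨hc, _⟩ | ⟨hc, _⟩
      · exact absurd hb h0
      · exact absurd hb h1
      all_goals omega
  · have hle := foldl_min_le_mem L 4 3 ((hmem 3).mpr (Or.inr (Or.inr (Or.inr ⟨rfl, h3⟩))))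
    rcases hcases with h | h
    · omega
    · rcases (hmem _).mp h with ⟨hc, hb⟩ | ⟨hc, hb⟩ | ⟨hc, hb⟩ | ⟨hc, _⟩
      · exact absurd hb h0
      · exact absurd hb h1
      · exact absurd hb h2
      all_goals omega
  · rcases hcases with h | h
    · omega
    · rcases (hmem _).mp h with ⟨hc, hb⟩ | ⟨hc, hb⟩ | ⟨hc, hb⟩ | ⟨hc, hb⟩
      · exact absurd hb h0
      · exact absurd hb h1
      · exact absurd hb h2
      · exact absurd hb h3

-- ===== VERDICT =====
theorem suggest_audiences_spec : Claim_equal_suggest_audiences := by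
  intro topic _
  have hlen : catAudiences.length - 1 = 4 := rfl
  simp only [Spec_suggest_audiences, suggest_audiences, suggest_audiences_alt, hlen,
    best_eq (PySem.Str.lower topic)]
  split_ifs <;> rfl
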